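-- pv_equiv track=rewrite | github.com/perquisite/tobacco | 案卷成果软件源代码/yancaoRegularDemo/Resource/table_1_18/table14.py | isNullRight
-- ===== SOURCE A (Python) =====
-- def isNullRight(l):
--     if l[0].strip() == '':
--         for i in range(0, len(l)):
--             if l[i].strip() != '':
--                 return False
--         return True
--     else:
--         for i in range(0, len(l)):
--             if l[i].strip() == '':
--                 return False
--         return True
-- ===== SOURCE B (Python) =====
-- def isNullRight(l):
--     c = sum(1 for x in l if x.strip() == '')
--     return c == 0 or c == len(l)
-- ===== Notes on version B (the rewrite author's own statement) =====
-- stated objective: alternative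
-- what changed: Replaces A's first-element branch selecting one of two mirror scan loops with a counting formulation: count stripped-empty elements once and accept iff the count is 0 or len(l).
import Mathlib
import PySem

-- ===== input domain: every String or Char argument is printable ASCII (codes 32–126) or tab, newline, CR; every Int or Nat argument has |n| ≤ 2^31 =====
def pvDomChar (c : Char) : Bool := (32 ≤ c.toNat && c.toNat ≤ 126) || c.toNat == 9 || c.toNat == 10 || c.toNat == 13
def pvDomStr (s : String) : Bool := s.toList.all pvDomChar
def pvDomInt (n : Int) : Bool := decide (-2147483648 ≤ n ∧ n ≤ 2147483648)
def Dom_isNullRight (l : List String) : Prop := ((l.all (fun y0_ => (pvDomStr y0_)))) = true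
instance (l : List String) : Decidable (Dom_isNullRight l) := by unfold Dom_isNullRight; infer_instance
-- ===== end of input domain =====

-- B replaces A's first-element branch with two mirror scan loops by a single counting
-- pass: count stripped-empty elements and accept iff the count is 0 or len(l)
-- (objective: alternative).


-- ===== PORT A =====
-- l[0] raises IndexError on []; pyGet? returns none there (excluded by Pre_).
def isNullRight (l : List String) : Bool :=
  match PySem.List.pyGet? l 0 with
  | none => false
  | some h =>
    if PySem.Str.strip h == "" then
      -- for i in range(len(l)): return False on first non-empty element; else True
      l.all (fun x => PySem.Str.strip x == "")
    else
      -- for i in range(len(l)): return False on first empty element; else True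
      l.all (fun x => !(PySem.Str.strip x == ""))

-- ===== PORT B =====
-- c = sum(1 for x in l if x.strip() == ''); return c == 0 or c == len(l)
def isNullRight_alt (l : List String) : Bool :=
  let c := l.foldl (fun acc x => if PySem.Str.strip x == "" then acc + 1 else acc) 0
  c == 0 || c == l.length

-- ===== PRECONDITION & SPEC =====
-- Pre_ excludes only the empty list, on which A raises IndexError at l[0].
def Pre_isNullRight (l : List String) : Prop := l ≠ []
instance (l : List String) : Decidable (Pre_isNullRight l) := by unfold Pre_isNullRight; infer_instance
def pvWitness_isNullRight : List String := ["a", " ", "b"]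

def Spec_isNullRight (l : List String) (out : Bool) : Prop := out = isNullRight_alt l
instance (l : List String) (out : Bool) : Decidable (Spec_isNullRight l out) := by unfold Spec_isNullRight; infer_instance

-- ===== CLAIM (what is proved, stated in full; the proofs are below) =====
def Claim_equal_isNullRight : Prop := ∀ (l : List String), Dom_isNullRight l → Pre_isNullRight l → Spec_isNullRight l (isNullRight l)

-- ===== LEMMAS AND PROOFS =====

-- The fold in B counts the stripped-empty elements.
theorem pv_fold_countP (l : List String) (n : Nat) :
    l.foldl (fun acc x => if PySem.Str.strip x == "" then acc + 1 else acc) n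
      = n + l.countP (fun x => PySem.Str.strip x == "") := by
  induction l generalizing n with
  | nil => simp
  | cons a t ih =>
    simp only [List.foldl_cons, List.countP_cons, ih]
    by_cases h : PySem.Str.strip a == ""
    · simp [h]; omega
    · simp [h]

-- ===== VERDICT (by name: the statement is the Claim_ definition above) =====
theorem isNullRight_spec : Claim_equal_isNullRight := by
  intro l _ hne
  unfold Spec_isNullRight isNullRight isNullRight_alt
  obtain ⟨h, t, rfl⟩ := List.exists_cons_of_ne_nil hne
  simp only [pv_fold_countP, Nat.zero_add]
  have hcle : (h :: t).countP (fun x => PySem.Str.strip x == "") ≤ (h :: t).length :=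
    List.countP_le_length
  by_cases hs : PySem.Str.strip h == ""
  · have hget : PySem.List.pyGet? (h :: t) 0 = some h := by
      simp [PySem.List.pyGet?, PySem.List.pyIdx?]
    rw [hget]
    simp only [hs]
    by_cases hall : (h :: t).all (fun x => PySem.Str.strip x == "")
    · rw [hall]
      have : (h :: t).countP (fun x => PySem.Str.strip x == "") = (h :: t).length := by
        rw [List.countP_eq_length]
        intro a ha; exact (List.all_eq_true.mp hall) a ha
      simp [this]
    · rw [Bool.eq_false_iff.mpr hall]
      have hlt : (h :: t).countP (fun x => PySem.Str.strip x == "") < (h :: t).length := by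
        rcases Nat.lt_or_ge ((h :: t).countP (fun x => PySem.Str.strip x == "")) (h :: t).length with hlt | hge
        · exact hlt
        · exfalso; apply hall
          rw [List.all_eq_true]
          intro a ha
          exact (List.countP_eq_length.mp (Nat.le_antisymm hcle hge)) a ha
      have hpos : 0 < (h :: t).countP (fun x => PySem.Str.strip x == "") :=
        List.countP_pos_iff.mpr ⟨h, List.mem_cons_self, hs⟩
      symm
      simp only [if_true, Bool.or_eq_false_iff, beq_eq_false_iff_ne, ne_eq]
      omega
  · have hget : PySem.List.pyGet? (h :: t) 0 = some h := by
      simp [PySem.List.pyGet?, PySem.List.pyIdx?]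
    rw [hget]
    simp only [hs]
    by_cases hall : (h :: t).all (fun x => !(PySem.Str.strip x == ""))
    · rw [hall]
      have : (h :: t).countP (fun x => PySem.Str.strip x == "") = 0 := by
        rw [List.countP_eq_zero]
        intro a ha
        have := (List.all_eq_true.mp hall) a ha
        simpa using this
      simp [this]
    · rw [Bool.eq_false_iff.mpr hall]
      have hpos : 0 < (h :: t).countP (fun x => PySem.Str.strip x == "") := by
        rcases Nat.eq_zero_or_pos ((h :: t).countP (fun x => PySem.Str.strip x == "")) with hz | hp
        · exfalso; apply hall
          rw [List.all_eq_true]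
          intro a ha
          have := (List.countP_eq_zero.mp hz) a ha
          simpa using this
        · exact hp
      have hlt : (h :: t).countP (fun x => PySem.Str.strip x == "") < (h :: t).length := by
        rcases Nat.lt_or_ge ((h :: t).countP (fun x => PySem.Str.strip x == "")) (h :: t).length with hlt | hge
        · exact hlt
        · exfalso
          have := (List.countP_eq_length.mp (Nat.le_antisymm hcle hge)) h List.mem_cons_self
          exact absurd this (by simpa using hs)
      symm
      simp only [Bool.false_eq_true, if_false, Bool.or_eq_false_iff,
        beq_eq_false_iff_ne, ne_eq]
      omega
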